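-- pv_equiv track=rewrite | github.com/pranjal269/LLM_baja | app/utils.py | normalize_medical_terms
-- ===== SOURCE A (Python) =====
-- def normalize_medical_terms(text: str) -> str:
--     """Normalize medical terminology"""
--     # Common medical term mappings
--     medical_mappings = {
--         'cardiac': 'heart',
--         'orthopedic': 'bone',
--         'ophthalmology': 'eye',
--         'neurology': 'brain',
--         'oncology': 'cancer',
--         'gynaecology': 'gynecology',
--         'paediatrics': 'pediatrics'
--     }
--
--     normalized_text = text.lower()
--     for original, normalized in medical_mappings.items():
--         normalized_text = normalized_text.replace(original, normalized)
--
--     return normalized_text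
-- ===== SOURCE B (Python) =====
-- def normalize_medical_terms(text: str) -> str:
--     """Normalize medical terminology (single left-to-right scan over the lowered text)."""
--     medical_mappings = {
--         'cardiac': 'heart',
--         'orthopedic': 'bone',
--         'ophthalmology': 'eye',
--         'neurology': 'brain',
--         'oncology': 'cancer',
--         'gynaecology': 'gynecology',
--         'paediatrics': 'pediatrics'
--     }
--     s = text.lower()
--     out = []
--     i = 0
--     n = len(s)
--     while i < n:
--         for original, normalized in medical_mappings.items():
--             if s.startswith(original, i):
--                 out.append(normalized)
--                 i += len(original)
--                 break
--         else:
--             out.append(s[i])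
--             i += 1
--     return ''.join(out)
-- ===== Notes on version B (the rewrite author's own statement) =====
-- stated objective: alternative
-- what changed: B replaces A's seven sequential whole-text str.replace passes by a single left-to-right scan of the lowered text that at each position tries the mapping keys and substitutes the leftmost matching term.
-- intended difference: On texts whose lowercased form contains 'orthopedicardiac' or 'orthopedicurology', A's passes interact (A returns 'orthopediheart' for 'orthopedicardiac', and 'bobrain' for 'orthopedicurology', where it replaces a 'neurology' that only exists because its own 'orthopedic'->'bone' replacement produced 'bone'+'urology'); B replaces the leftmost term and returns 'boneardiac' / 'boneurology', the intended behaviour of term replacement. — e.g. on normalize_medical_terms("orthopedicurology"): A returns "bobrain", B returns "boneurology"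
import Mathlib
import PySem

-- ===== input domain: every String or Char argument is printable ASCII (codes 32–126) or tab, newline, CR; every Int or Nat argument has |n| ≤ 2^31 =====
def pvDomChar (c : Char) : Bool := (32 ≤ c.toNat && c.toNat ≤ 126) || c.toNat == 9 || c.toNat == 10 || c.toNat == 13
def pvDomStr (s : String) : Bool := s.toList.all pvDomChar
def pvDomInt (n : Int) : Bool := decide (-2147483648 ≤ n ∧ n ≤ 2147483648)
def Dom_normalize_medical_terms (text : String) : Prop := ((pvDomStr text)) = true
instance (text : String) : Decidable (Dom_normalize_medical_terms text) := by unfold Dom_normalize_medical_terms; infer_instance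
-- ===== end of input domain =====

-- B replaces A's seven sequential str.replace passes by one left-to-right scan of the lowered text
-- (leftmost term wins); same return value except on the two overlap/fabrication corners stated in D_ below.

-- ===== PORT A =====
def normalize_medical_terms (text : String) : String :=
  let medical_mappings : PySem.Dict String String :=
    PySem.Dict.ofList
      [("cardiac", "heart"), ("orthopedic", "bone"), ("ophthalmology", "eye"),
       ("neurology", "brain"), ("oncology", "cancer"), ("gynaecology", "gynecology"),
       ("paediatrics", "pediatrics")]
  let normalized_text := PySem.Str.lower text
  medical_mappings.items.foldl (fun nt kv => PySem.Str.replace nt kv.1 kv.2) normalized_text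

-- ===== PORT B =====
-- Source B's dict of mappings, as an ordered association list over List Char (insertion order)
def pvMappings : List (List Char × List Char) :=
  [("cardiac".toList, "heart".toList), ("orthopedic".toList, "bone".toList),
   ("ophthalmology".toList, "eye".toList), ("neurology".toList, "brain".toList),
   ("oncology".toList, "cancer".toList), ("gynaecology".toList, "gynecology".toList),
   ("paediatrics".toList, "pediatrics".toList)]

-- Source B's while loop: at each position try the mappings in order (s.startswith(original, i));
-- on a match emit the replacement and jump past the term, else copy one character.
-- (consuming the head char and then dropping `k.length - 1` equals dropping `k.length` from the
--  whole string for the nonempty keys here; phrased this way so termination is by remaining length)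
def pvScanGo (ps : List (List Char × List Char)) : Nat → List Char → List Char
  | _, [] => []
  | 0, _ :: _ => []        -- never reached: the fuel starts at the string's length
  | fuel + 1, c :: t =>
    match ps.find? (fun kv => kv.1.isPrefixOf (c :: t)) with
    | some (k, v) => v ++ pvScanGo ps fuel (t.drop (k.length - 1))
    | none => c :: pvScanGo ps fuel t

def pvScan (ps : List (List Char × List Char)) (s : List Char) : List Char :=
  pvScanGo ps s.length s

def normalize_medical_terms_alt (text : String) : String :=
  String.ofList (pvScan pvMappings (PySem.Str.lower text).toList)

-- ===== PRECONDITION & SPEC =====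
-- On texts whose lowercased form contains "orthopedicardiac" or "orthopedicurology", A's sequential
-- replace passes interact: an earlier pass consumes or fabricates a later key (A returns
-- "orthopediheart" for "orthopedicardiac", and "bobrain" for "orthopedicurology" — it replaces a
-- "neurology" that only exists because "orthopedic"→"bone" produced "bone"+"urology"); B replaces
-- the leftmost matching term and returns "boneardiac" / "boneurology", the intended behaviour.
def D_normalize_medical_terms (text : String) : Prop :=
  PySem.Chars.isIn "orthopedicardiac".toList (PySem.Chars.lower text.toList) = true ∨
  PySem.Chars.isIn "orthopedicurology".toList (PySem.Chars.lower text.toList) = true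

instance (text : String) : Decidable (D_normalize_medical_terms text) := by
  unfold D_normalize_medical_terms; infer_instance

def Spec_normalize_medical_terms (text : String) (out : String) : Prop :=
  ¬ D_normalize_medical_terms text → out = normalize_medical_terms_alt text

instance (text : String) (out : String) : Decidable (Spec_normalize_medical_terms text out) := by
  unfold Spec_normalize_medical_terms; infer_instance

def pvDiffWitness_normalize_medical_terms : String := "orthopedicurology"

def pvDiffWitnessOut_normalize_medical_terms : String × String := ("bobrain", "boneurology")

-- ===== CLAIM (what is proved, stated in full; the proofs are below) =====
def Claim_unchanged_normalize_medical_terms : Prop := ∀ (text : String), Dom_normalize_medical_terms text → Spec_normalize_medical_terms text (normalize_medical_terms text)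
def Claim_changed_normalize_medical_terms : Prop := Dom_normalize_medical_terms (pvDiffWitness_normalize_medical_terms) ∧ D_normalize_medical_terms (pvDiffWitness_normalize_medical_terms) ∧ normalize_medical_terms (pvDiffWitness_normalize_medical_terms) = pvDiffWitnessOut_normalize_medical_terms.1 ∧ normalize_medical_terms_alt (pvDiffWitness_normalize_medical_terms) = pvDiffWitnessOut_normalize_medical_terms.2 ∧ pvDiffWitnessOut_normalize_medical_terms.1 ≠ pvDiffWitnessOut_normalize_medical_terms.2
def Claim_exact_normalize_medical_terms : Prop := ∀ (text : String), Dom_normalize_medical_terms text → D_normalize_medical_terms text → normalize_medical_terms text ≠ normalize_medical_terms_alt text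

-- ===== LEMMAS AND PROOFS =====
lemma pvScanGo_congr (ps : List (List Char × List Char)) :
    ∀ f1, ∀ f2, ∀ s : List Char, s.length ≤ f1 → s.length ≤ f2 →
      pvScanGo ps f1 s = pvScanGo ps f2 s := by
  intro f1
  induction f1 with
  | zero =>
    intro f2 s h1 _
    have : s = [] := List.eq_nil_of_length_eq_zero (Nat.le_zero.mp h1)
    subst this
    cases f2 <;> rfl
  | succ n ih =>
    intro f2 s h1 h2
    cases s with
    | nil => cases f2 <;> rfl
    | cons c t =>
      cases f2 with
      | zero => simp at h2
      | succ m =>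
        show pvScanGo ps (n+1) (c :: t) = pvScanGo ps (m+1) (c :: t)
        rw [pvScanGo, pvScanGo]
        rcases hf : ps.find? (fun kv => kv.1.isPrefixOf (c :: t)) with _ | ⟨k, v⟩
        · simp only [hf]
          rw [ih m t (by simpa using h1) (by simpa using h2)]
        · simp only [hf]
          rw [ih m (t.drop (k.length - 1))
            (by rw [List.length_drop]; simp only [List.length_cons] at h1; omega)
            (by rw [List.length_drop]; simp only [List.length_cons] at h2; omega)]

lemma pvScan_nil (ps : List (List Char × List Char)) : pvScan ps [] = [] := rfl

lemma pvScan_cons_some {ps : List (List Char × List Char)} {c : Char} {t k v : List Char}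
    (h : ps.find? (fun kv => kv.1.isPrefixOf (c :: t)) = some (k, v)) :
    pvScan ps (c :: t) = v ++ pvScan ps (t.drop (k.length - 1)) := by
  unfold pvScan
  show pvScanGo ps (t.length + 1) (c :: t) = _
  rw [pvScanGo, h]
  simp only [h]
  rw [pvScanGo_congr ps t.length (t.drop (k.length - 1)).length (t.drop (k.length - 1))
    (by rw [List.length_drop]; omega) le_rfl]

lemma pvScan_cons_none {ps : List (List Char × List Char)} {c : Char} {t : List Char}
    (h : ps.find? (fun kv => kv.1.isPrefixOf (c :: t)) = none) :
    pvScan ps (c :: t) = c :: pvScan ps t := by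
  unfold pvScan
  show pvScanGo ps (t.length + 1) (c :: t) = _
  rw [pvScanGo, h]

def pvRep (old new : List Char) : List Char → List Char
  | [] => []
  | c :: t =>
    if old.isPrefixOf (c :: t) then new ++ pvRep old new (t.drop (old.length - 1))
    else c :: pvRep old new t
termination_by s => s.length
decreasing_by all_goals (simp only [List.length_drop, List.length_cons]; omega)

lemma pvRep_nil (old new) : pvRep old new [] = [] := by rw [pvRep]
lemma pvRep_cons_pos {old new : List Char} {c : Char} {t : List Char} (h : old.isPrefixOf (c :: t)) :
    pvRep old new (c :: t) = new ++ pvRep old new (t.drop (old.length - 1)) := by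
  rw [pvRep, if_pos h]
lemma pvRep_cons_neg {old new : List Char} {c : Char} {t : List Char} (h : ¬ old.isPrefixOf (c :: t)) :
    pvRep old new (c :: t) = c :: pvRep old new t := by
  rw [pvRep, if_neg h]

-- go bridge
lemma pvGo_eq (old new : List Char) (hk : old ≠ []) :
    ∀ fuel (l acc : List Char), l.length ≤ fuel →
      PySem.Chars.replace.go old new fuel l acc = acc.reverse ++ pvRep old new l := by
  intro fuel
  induction fuel with
  | zero =>
    intro l acc hl
    have : l = [] := List.eq_nil_of_length_eq_zero (Nat.le_zero.mp hl)
    subst this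
    rw [PySem.Chars.replace.go, pvRep_nil]
  | succ n ih =>
    intro l acc hl
    cases l with
    | nil => rw [PySem.Chars.replace.go] <;> simp [pvRep_nil]
    | cons c t =>
      by_cases h : old.isPrefixOf (c :: t)
      · rw [PySem.Chars.replace.go]
        simp only [h, if_pos]
        have hlen : (List.drop old.length (c :: t)).length ≤ n := by
          simp only [List.length_drop, List.length_cons] at *
          cases old with
          | nil => exact absurd rfl hk
          | cons o os => simp; omega
        rw [ih _ _ hlen, pvRep_cons_pos h]
        have : List.drop old.length (c :: t) = t.drop (old.length - 1) := by
          cases old with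
          | nil => exact absurd rfl hk
          | cons o os => simp
        rw [this]; simp
      · rw [PySem.Chars.replace.go]
        simp only [h, if_false, Bool.false_eq_true]
        have hlen : t.length ≤ n := by simp at hl; omega
        rw [ih _ _ hlen, pvRep_cons_neg h]
        simp

lemma replace_eq_pvRep (s old new : List Char) (hk : old ≠ []) :
    PySem.Chars.replace s old new = pvRep old new s := by
  unfold PySem.Chars.replace
  rw [if_neg (by simpa using hk)]
  simpa using pvGo_eq old new hk s.length s [] le_rfl

-- ===== prefix utilities =====
lemma pvNoPre (a b : List Char) (h1 : ¬ a.isPrefixOf b) (h2 : ¬ b.isPrefixOf a) (w : List Char) :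
    ¬ a.isPrefixOf (b ++ w) := by
  rw [List.isPrefixOf_iff_prefix] at *
  intro h
  rcases List.prefix_or_prefix_of_prefix h (List.prefix_append b w) with h3 | h3
  · exact h1 h3
  · exact h2 h3

lemma pvPrefixLe {x y z : List Char} (h : x <+: y ++ z) (h2 : x.length ≤ y.length) : x <+: y := by
  rcases List.prefix_or_prefix_of_prefix h (List.prefix_append y z) with h3 | h3
  · exact h3
  · exact (List.IsPrefix.eq_of_length_le h3 h2) ▸ List.prefix_rfl

lemma pvPrefixDrop {a b : List Char} (i : Nat) (h : a <+: b) (hi : i ≤ a.length) :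
    a.drop i <+: b.drop i := by
  rcases h with ⟨r, rfl⟩
  rw [List.drop_append_of_le_length hi]
  exact ⟨r, rfl⟩

lemma pvConsPre {key : List Char} {c : Char} {X : List Char}
    (hne : key ≠ []) (h : key.isPrefixOf (c :: X)) :
    ∃ w₁, key = c :: w₁ ∧ w₁ <+: X := by
  cases key with
  | nil => exact absurd rfl hne
  | cons b w₁ =>
    have := List.isPrefixOf_iff_prefix.mp h
    rcases List.cons_prefix_cons.mp this with ⟨rfl, hw⟩
    exact ⟨w₁, rfl, hw⟩

lemma pvFind?_congr {α : Type} (l : List α) (p q : α → Bool) (h : ∀ x ∈ l, p x = q x) :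
    l.find? p = l.find? q := by
  induction l with
  | nil => rfl
  | cons a l ih =>
    rw [List.find?_cons, List.find?_cons, h a (by simp)]
    cases hq : q a with
    | true => rfl
    | false => exact ih (fun x hx => h x (by simp [hx]))

-- ===== pvRep structure =====
lemma pvRep_match {old new : List Char} (hk : old ≠ []) (u : List Char) :
    pvRep old new (old ++ u) = new ++ pvRep old new u := by
  cases old with
  | nil => exact absurd rfl hk
  | cons c o' =>
    have hpre : (c :: o').isPrefixOf ((c :: o') ++ u) := by
      rw [List.isPrefixOf_iff_prefix]; exact List.prefix_append _ _
    rw [List.cons_append, pvRep_cons_pos (by simpa using hpre)]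
    simp [List.drop_left]

lemma pvRep_skip {old new : List Char} (hk : old ≠ []) :
    ∀ (n : Nat) (u : List Char), (∀ q < n, ¬ old.isPrefixOf (u.drop q)) →
      pvRep old new u = u.take n ++ pvRep old new (u.drop n) := by
  intro n
  induction n with
  | zero => intro u _; simp
  | succ m ih =>
    intro u h
    cases u with
    | nil => simp [pvRep_nil]
    | cons c t =>
      rw [pvRep_cons_neg (by simpa using h 0 (Nat.succ_pos m))]
      rw [ih t (fun q hq => by simpa using h (q+1) (by omega))]
      simp

lemma pvRep_decomp (old new : List Char) (hk : old ≠ []) (u : List Char) :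
    pvRep old new u = u ∨
      ∃ p u', (∀ q < p, ¬ old.isPrefixOf (u.drop q)) ∧ u.drop p = old ++ u' ∧
        pvRep old new u = u.take p ++ (new ++ pvRep old new u') := by
  induction u with
  | nil => left; exact pvRep_nil _ _
  | cons c t ih =>
    by_cases h : old.isPrefixOf (c :: t)
    · right
      rcases pvConsPre hk h with ⟨o', rfl, ho⟩
      rcases ho with ⟨u', rfl⟩
      refine ⟨0, u', by simp, by simp, ?_⟩
      rw [pvRep_cons_pos h]
      simp [List.drop_left]
    · rcases ih with heq | ⟨p, u', hmin, hdrop, heq⟩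
      · left; rw [pvRep_cons_neg h, heq]
      · right
        refine ⟨p + 1, u', ?_, by simpa using hdrop, ?_⟩
        · intro q hq
          cases q with
          | zero => simpa using h
          | succ q' => simpa using hmin q' (by omega)
        · rw [pvRep_cons_neg h, heq]; simp

-- ===== scan structure =====
lemma pvScan_nilKeys (s : List Char) : pvScan [] s = s := by
  induction s with
  | nil => exact pvScan_nil _
  | cons c t ih => rw [pvScan_cons_none (by simp), ih]

lemma pvScan_emit (qs : List (List Char × List Char)) (W : List Char) :
    ∀ v : List Char, (∀ m, m < v.length → ∀ kv ∈ qs, ¬ kv.1.isPrefixOf (v.drop m ++ W)) →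
      pvScan qs (v ++ W) = v ++ pvScan qs W := by
  intro v
  induction v with
  | nil => simp
  | cons c v' ih =>
    intro h
    rw [List.cons_append]
    have hnone : qs.find? (fun kv => kv.1.isPrefixOf (c :: (v' ++ W))) = none := by
      rw [List.find?_eq_none]
      intro kv hmem
      have := h 0 (by simp) kv hmem
      simpa using this
    rw [pvScan_cons_none hnone]
    rw [ih (fun m hm kv hmem => by simpa using h (m+1) (by simpa using hm) kv hmem)]
    simp

-- ===== the generic per-pass lemma =====
lemma pvGenStep (k v : List Char) (qs : List (List Char × List Char)) (OK : List Char → Prop)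
    (hk : k ≠ [])
    (hqs : ∀ kv ∈ qs, kv.1 ≠ ([] : List Char))
    (huniq : ∀ a ∈ k :: qs.map Prod.fst, ∀ b ∈ k :: qs.map Prod.fst, a.isPrefixOf b → a = b)
    (hOKsuf : ∀ u w : List Char, w <:+ u → OK u → OK w)
    (hcross : ∀ s, OK s → ∀ kv ∈ qs, kv.1.isPrefixOf s →
        ∀ q, 0 < q → q < kv.1.length → ¬ k.isPrefixOf (s.drop q))
    (hemit : ∀ u, OK (k ++ u) → ∀ m, m < v.length → ∀ kv ∈ qs,
        ¬ kv.1.isPrefixOf (v.drop m ++ pvRep k v u))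
    (hnocreate : ∀ kv ∈ qs, ∀ m, m < kv.1.length → 0 < m →
        ¬ (kv.1.drop m).isPrefixOf v ∧ ¬ v.isPrefixOf (kv.1.drop m)) :
    ∀ s, OK s → pvScan ((k, v) :: qs) s = pvScan qs (pvRep k v s) := by
  suffices H : ∀ n, ∀ s : List Char, s.length ≤ n → OK s →
      pvScan ((k, v) :: qs) s = pvScan qs (pvRep k v s) by
    intro s hOK; exact H s.length s le_rfl hOK
  intro n
  induction n with
  | zero =>
    intro s hl _
    have : s = [] := List.eq_nil_of_length_eq_zero (Nat.le_zero.mp hl)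
    subst this
    simp [pvScan_nil, pvRep_nil]
  | succ n IH =>
    intro s hl hOK
    cases s with
    | nil => simp [pvScan_nil, pvRep_nil]
    | cons c t =>
      by_cases hkp : k.isPrefixOf (c :: t)
      · -- case (i): k matches at position 0
        rcases pvConsPre hk hkp with ⟨k', rfl, hk'⟩
        rcases hk' with ⟨u, rfl⟩
        have hLHS : pvScan ((c :: k', v) :: qs) (c :: (k' ++ u)) =
            v ++ pvScan ((c :: k', v) :: qs) u := by
          rw [pvScan_cons_some (List.find?_cons_of_pos (by simpa using hkp))]
          simp [List.drop_left]
        have hsu : c :: (k' ++ u) = (c :: k') ++ u := by simp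
        have hrep : pvRep (c :: k') v (c :: (k' ++ u)) = v ++ pvRep (c :: k') v u := by
          rw [hsu, pvRep_match hk]
        have hOKu : OK u := hOKsuf _ _ ⟨c :: k', by simp⟩ hOK
        have hIH : pvScan ((c :: k', v) :: qs) u = pvScan qs (pvRep (c :: k') v u) := by
          apply IH u _ hOKu
          simp only [List.length_cons, List.length_append] at hl ⊢
          omega
        rw [hLHS, hrep, hIH]
        rw [pvScan_emit qs _ v (hemit u (hsu ▸ hOK))]
      · rcases hfind : qs.find? (fun kv => kv.1.isPrefixOf (c :: t)) with _ | ⟨k₀, v₀⟩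
        · -- case (iii): nothing matches at position 0
          have hnonecons : ((k, v) :: qs).find? (fun kv => kv.1.isPrefixOf (c :: t)) = none := by
            rw [List.find?_cons_of_neg (by simpa using hkp), hfind]
          have hnone : ∀ kv ∈ qs, ¬ kv.1.isPrefixOf (c :: t) := by
            intro kv hm
            have := List.find?_eq_none.mp hfind kv hm
            simpa using this
          rw [pvScan_cons_none hnonecons]
          rw [pvRep_cons_neg hkp]
          have hrnone : qs.find? (fun kv => kv.1.isPrefixOf (c :: pvRep k v t)) = none := by
            rw [List.find?_eq_none]
            intro kv hmem hpre
            rcases pvConsPre (hqs kv hmem) hpre with ⟨w₁, hkv, hw₁⟩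
            rcases pvRep_decomp k v hk t with heq | ⟨p, u', hmin, hdrop, heq⟩
            · rw [heq] at hw₁
              exact hnone kv hmem (by
                rw [hkv, List.isPrefixOf_iff_prefix]
                exact List.cons_prefix_cons.mpr ⟨rfl, hw₁⟩)
            · have hpt : p ≤ t.length := by
                by_contra hgt
                push_neg at hgt
                have hnil : t.drop p = [] := List.drop_eq_nil_of_le (le_of_lt hgt)
                rw [hnil] at hdrop
                exact hk (List.append_eq_nil_iff.mp hdrop.symm).1
              rw [heq] at hw₁
              by_cases hle : w₁.length ≤ p
              · have htake : w₁ <+: t.take p :=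
                  pvPrefixLe hw₁ (by simpa [Nat.min_eq_left hpt] using hle)
                have : w₁ <+: t := htake.trans (List.take_prefix p t)
                exact hnone kv hmem (by
                  rw [hkv, List.isPrefixOf_iff_prefix]
                  exact List.cons_prefix_cons.mpr ⟨rfl, this⟩)
              · push_neg at hle
                have hdrop2 : w₁.drop p <+: v ++ pvRep k v u' := by
                  have := pvPrefixDrop p hw₁ (le_of_lt hle)
                  rwa [List.drop_left' (by simpa [Nat.min_eq_left hpt])] at this
                have hw1d : w₁.drop p = kv.1.drop (p + 1) := by rw [hkv]; simp
                have hlen1 : p + 1 < kv.1.length := by rw [hkv]; simp; omega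
                have hnc := hnocreate kv hmem (p + 1) hlen1 (Nat.succ_pos p)
                rcases List.prefix_or_prefix_of_prefix hdrop2 (List.prefix_append v _) with h3 | h3
                · exact hnc.1 (by rw [List.isPrefixOf_iff_prefix, ← hw1d]; exact h3)
                · exact hnc.2 (by rw [List.isPrefixOf_iff_prefix, ← hw1d]; exact h3)
          rw [pvScan_cons_none hrnone]
          have hOKt : OK t := hOKsuf _ _ ⟨[c], rfl⟩ hOK
          rw [IH t (by simpa using Nat.lt_succ_iff.mp (by simpa using hl)) hOKt]
        · -- case (ii): a key of qs matches at position 0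
          have hmem : (k₀, v₀) ∈ qs := List.mem_of_find?_eq_some hfind
          have hpre : k₀.isPrefixOf (c :: t) := by
            have := List.find?_some hfind
            simpa using this
          have hne₀ : k₀ ≠ [] := by simpa using hqs (k₀, v₀) hmem
          rcases pvConsPre hne₀ hpre with ⟨w', hk₀, hw'⟩
          rcases hw' with ⟨rest, hrest⟩
          -- LHS
          have hLHS : pvScan ((k, v) :: qs) (c :: t) =
              v₀ ++ pvScan ((k, v) :: qs) rest := by
            rw [pvScan_cons_some (by rw [List.find?_cons_of_neg (by simpa using hkp)]; exact hfind)]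
            rw [hk₀]
            simp only [List.length_cons, Nat.add_sub_cancel]
            rw [← hrest, List.drop_left]
          -- RHS
          have hcross' : ∀ q' < w'.length, ¬ k.isPrefixOf (t.drop q') := by
            intro q' hq'
            have := hcross (c :: t) hOK (k₀, v₀) hmem hpre (q' + 1) (Nat.succ_pos q')
              (by rw [hk₀]; simpa using Nat.succ_lt_succ hq')
            simpa using this
          have hrept : pvRep k v t = w' ++ pvRep k v rest := by
            rw [pvRep_skip hk w'.length t hcross', ← hrest, List.take_left, List.drop_left]
          have hrepc : pvRep k v (c :: t) = k₀ ++ pvRep k v rest := by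
            rw [pvRep_cons_neg hkp, hrept, hk₀]; simp
          -- find? on the rewritten string picks the same entry
          have hfind2 : qs.find? (fun kv => kv.1.isPrefixOf (k₀ ++ pvRep k v rest)) = some (k₀, v₀) := by
            rw [pvFind?_congr qs _ (fun kv => kv.1.isPrefixOf (c :: t)) ?_, hfind]
            intro kv hkvmem
            have hmemk : kv.1 ∈ k :: qs.map Prod.fst := by
              simp only [List.mem_cons]; right; exact List.mem_map_of_mem hkvmem
            have hmemk₀ : k₀ ∈ k :: qs.map Prod.fst := by
              simp only [List.mem_cons]; right
              exact List.mem_map_of_mem hmem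
            have hiff : kv.1 <+: k₀ ++ pvRep k v rest ↔ kv.1 <+: c :: t := by
              constructor
              · intro h
                rcases List.prefix_or_prefix_of_prefix h (List.prefix_append k₀ _) with h3 | h3
                · exact h3.trans (List.isPrefixOf_iff_prefix.mp hpre)
                · have : k₀ = kv.1 := huniq k₀ hmemk₀ kv.1 hmemk (List.isPrefixOf_iff_prefix.mpr h3)
                  rw [← this]; exact List.isPrefixOf_iff_prefix.mp hpre
              · intro h
                rcases List.prefix_or_prefix_of_prefix h (List.isPrefixOf_iff_prefix.mp hpre) with h3 | h3
                · exact h3.trans (List.prefix_append k₀ _)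
                · have : k₀ = kv.1 := huniq k₀ hmemk₀ kv.1 hmemk (List.isPrefixOf_iff_prefix.mpr h3)
                  rw [← this]; exact List.prefix_append k₀ _
            exact Bool.eq_iff_iff.mpr (by simpa [List.isPrefixOf_iff_prefix] using hiff)
          have hRHS : pvScan qs (pvRep k v (c :: t)) = v₀ ++ pvScan qs (pvRep k v rest) := by
            have hfind2' : qs.find? (fun kv => kv.1.isPrefixOf (c :: (w' ++ pvRep k v rest))) =
                some (c :: w', v₀) := by
              rw [hk₀, List.cons_append] at hfind2; exact hfind2
            rw [hrepc, hk₀, List.cons_append, pvScan_cons_some hfind2']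
            simp only [List.length_cons, Nat.add_sub_cancel]
            rw [List.drop_left]
          have hOKrest : OK rest := by
            apply hOKsuf (c :: t) rest ⟨c :: w', ?_⟩ hOK
            rw [List.cons_append, hrest]
          have hIH : pvScan ((k, v) :: qs) rest = pvScan qs (pvRep k v rest) := by
            apply IH rest _ hOKrest
            have h1 : t.length ≤ n := by simpa using Nat.lt_succ_iff.mp (by simpa using hl)
            have h2 : rest.length ≤ t.length := by rw [← hrest]; simp
            omega
          rw [hLHS, hIH, ← hRHS]

-- helper: drop across an append, when the whole left part is dropped
lemma pvDropAppend (y z : List Char) (i : Nat) (h : y.length ≤ i) :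
    (y ++ z).drop i = z.drop (i - y.length) := by
  rcases Nat.exists_eq_add_of_le h with ⟨j, rfl⟩
  rw [List.drop_append]
  simp

lemma pvCrossConc (k key : List Char)
    (hconc : ∀ q, q < key.length → 0 < q →
      ¬ (key.drop q).isPrefixOf k ∧ ¬ k.isPrefixOf (key.drop q)) :
    ∀ s : List Char, key.isPrefixOf s → ∀ q, 0 < q → q < key.length →
      ¬ k.isPrefixOf (s.drop q) := by
  intro s hpre q h1 h2 hk
  rcases List.isPrefixOf_iff_prefix.mp hpre with ⟨r, rfl⟩
  rw [List.drop_append_of_le_length (le_of_lt h2)] at hk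
  exact pvNoPre _ _ (hconc q h2 h1).2 (hconc q h2 h1).1 r hk

def pvOK1 (s : List Char) : Prop :=
  ¬ "orthopedicardiac".toList <:+: s ∧ ¬ "orthopedicurology".toList <:+: s

def pvOK2 (s : List Char) : Prop := ¬ "orthopedicurology".toList <:+: s

lemma pvStep1 : ∀ s, pvOK1 s →
    pvScan [("cardiac".toList, "heart".toList), ("orthopedic".toList, "bone".toList),
      ("ophthalmology".toList, "eye".toList), ("neurology".toList, "brain".toList),
      ("oncology".toList, "cancer".toList), ("gynaecology".toList, "gynecology".toList),
      ("paediatrics".toList, "pediatrics".toList)] s =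
    pvScan [("orthopedic".toList, "bone".toList),
      ("ophthalmology".toList, "eye".toList), ("neurology".toList, "brain".toList),
      ("oncology".toList, "cancer".toList), ("gynaecology".toList, "gynecology".toList),
      ("paediatrics".toList, "pediatrics".toList)]
      (pvRep "cardiac".toList "heart".toList s) := by
  apply pvGenStep _ _ _ pvOK1 (by decide) (by decide) (by decide)
  · intro u w hsuf h
    exact ⟨fun hc => h.1 (hc.trans hsuf.isInfix), fun hc => h.2 (hc.trans hsuf.isInfix)⟩
  · -- hcross
    intro s hOK kv hmem hpre q hq0 hq1
    simp only [List.mem_cons, List.not_mem_nil, or_false] at hmem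
    rcases hmem with rfl | rfl | rfl | rfl | rfl | rfl
    case inl =>
      -- orthopedic: the only overlap with cardiac is at q = 9, excluded by pvOK1
      intro hc
      rcases List.isPrefixOf_iff_prefix.mp hpre with ⟨r, hr⟩
      rw [← hr, List.drop_append_of_le_length (le_of_lt (by simpa using hq1))] at hc
      have hq1' : q < 10 := by simpa using hq1
      interval_cases q
      · exact absurd hc (pvNoPre _ _ (by decide) (by decide) r)
      · exact absurd hc (pvNoPre _ _ (by decide) (by decide) r)
      · exact absurd hc (pvNoPre _ _ (by decide) (by decide) r)
      · exact absurd hc (pvNoPre _ _ (by decide) (by decide) r)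
      · exact absurd hc (pvNoPre _ _ (by decide) (by decide) r)
      · exact absurd hc (pvNoPre _ _ (by decide) (by decide) r)
      · exact absurd hc (pvNoPre _ _ (by decide) (by decide) r)
      · exact absurd hc (pvNoPre _ _ (by decide) (by decide) r)
      · -- q = 9
        rcases List.isPrefixOf_iff_prefix.mp hc with ⟨r2, hr2⟩
        rw [show "cardiac".toList = 'c' :: "ardiac".toList from by decide,
            show List.drop 9 ("orthopedic".toList, "bone".toList).1 = ['c'] from by decide] at hr2
        simp only [List.cons_append, List.singleton_append, List.cons.injEq, true_and] at hr2
        subst hr2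
        apply hOK.1
        refine ⟨[], r2, ?_⟩
        rw [← hr]
        simp only [List.nil_append,
          show ("orthopedicardiac".toList : List Char) = "orthopedic".toList ++ "ardiac".toList from by decide,
          List.append_assoc]
    all_goals exact fun hc => pvCrossConc _ _ (by decide) s hpre q hq0 hq1 hc
  · -- hemit
    intro u _ m hm kv hmem
    have hm' : m < 5 := by simpa using hm
    simp only [List.mem_cons, List.not_mem_nil, or_false] at hmem
    rcases hmem with rfl | rfl | rfl | rfl | rfl | rfl <;>
      interval_cases m <;>
      exact pvNoPre _ _ (by decide) (by decide) _
  · decide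

lemma pvStep2 : ∀ s, pvOK2 s →
    pvScan [("orthopedic".toList, "bone".toList),
      ("ophthalmology".toList, "eye".toList), ("neurology".toList, "brain".toList),
      ("oncology".toList, "cancer".toList), ("gynaecology".toList, "gynecology".toList),
      ("paediatrics".toList, "pediatrics".toList)] s =
    pvScan [("ophthalmology".toList, "eye".toList), ("neurology".toList, "brain".toList),
      ("oncology".toList, "cancer".toList), ("gynaecology".toList, "gynecology".toList),
      ("paediatrics".toList, "pediatrics".toList)]
      (pvRep "orthopedic".toList "bone".toList s) := by
  apply pvGenStep _ _ _ pvOK2 (by decide) (by decide) (by decide)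
  · intro u w hsuf h
    exact fun hc => h (hc.trans hsuf.isInfix)
  · intro s hOK kv hmem hpre q hq0 hq1
    simp only [List.mem_cons, List.not_mem_nil, or_false] at hmem
    rcases hmem with rfl | rfl | rfl | rfl | rfl <;>
      exact fun hc => pvCrossConc _ _ (by decide) s hpre q hq0 hq1 hc
  · -- hemit: 'bone'.drop 2 = "ne" can continue into "neurology" — excluded by pvOK2
    intro u hOK m hm kv hmem
    have hm' : m < 4 := by simpa using hm
    simp only [List.mem_cons, List.not_mem_nil, or_false] at hmem
    rcases hmem with rfl | rfl | rfl | rfl | rfl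
    case inr.inl =>
      -- neurology
      interval_cases m
      · exact pvNoPre _ _ (by decide) (by decide) _
      · exact pvNoPre _ _ (by decide) (by decide) _
      · -- m = 2 : the fabricated-"neurology" case
        intro hpre
        have hpre' := List.isPrefixOf_iff_prefix.mp hpre
        have hd := pvPrefixDrop 2 hpre' (by decide)
        rw [show List.drop 2 ("neurology".toList, "brain".toList).1 = "urology".toList from by decide,
            List.drop_left' (by decide)] at hd
        have hpu : ∀ p u', u.drop p = "orthopedic".toList ++ u' → p ≤ u.length := by
          intro p u' hdrop
          by_contra hgt
          push_neg at hgt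
          rw [List.drop_eq_nil_of_le (le_of_lt hgt)] at hdrop
          exact (by decide : ("orthopedic".toList : List Char) ≠ [])
            (List.append_eq_nil_iff.mp hdrop.symm).1
        have hu : "urology".toList <+: u := by
          rcases pvRep_decomp "orthopedic".toList "bone".toList (by decide) u with heq | ⟨p, u', hmin, hdrop, heq⟩
          · rwa [heq] at hd
          · rw [heq] at hd
            have hpu' := hpu p u' hdrop
            by_cases hle : ("urology".toList).length ≤ p
            · have : "urology".toList <+: u.take p :=
                pvPrefixLe hd (by simpa [List.length_take, Nat.min_eq_left hpu'] using hle)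
              exact this.trans (List.take_prefix p u)
            · push_neg at hle
              have hd2 := pvPrefixDrop p hd (le_of_lt hle)
              rw [List.drop_left' (by simp [List.length_take, Nat.min_eq_left hpu'])] at hd2
              have h7 : p < 7 := by
                have : ("urology".toList).length = 7 := by decide
                omega
              exfalso
              rcases List.prefix_or_prefix_of_prefix hd2 (List.prefix_append _ _) with h3 | h3
              · interval_cases p <;> exact absurd h3 (by decide)
              · interval_cases p <;> exact absurd h3 (by decide)
        rcases hu with ⟨r, hr⟩
        apply hOK
        refine ⟨[], r, ?_⟩
        rw [show ("orthopedicurology".toList : List Char) =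
              "orthopedic".toList ++ "urology".toList from by decide]
        simp only [List.nil_append, List.append_assoc, hr]
      · exact pvNoPre _ _ (by decide) (by decide) _
    all_goals (interval_cases m <;> exact pvNoPre _ _ (by decide) (by decide) _)
  · decide

lemma pvStep3 : ∀ s : List Char,
    pvScan [("ophthalmology".toList, "eye".toList), ("neurology".toList, "brain".toList),
      ("oncology".toList, "cancer".toList), ("gynaecology".toList, "gynecology".toList),
      ("paediatrics".toList, "pediatrics".toList)] s =
    pvScan [("neurology".toList, "brain".toList),
      ("oncology".toList, "cancer".toList), ("gynaecology".toList, "gynecology".toList),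
      ("paediatrics".toList, "pediatrics".toList)]
      (pvRep "ophthalmology".toList "eye".toList s) := by
  intro s
  apply pvGenStep _ _ _ (fun _ => True) (by decide) (by decide) (by decide)
    (fun _ _ _ _ => trivial) ?_ ?_ (by decide) s trivial
  · intro s _ kv hmem hpre q hq0 hq1
    simp only [List.mem_cons, List.not_mem_nil, or_false] at hmem
    rcases hmem with rfl | rfl | rfl | rfl <;>
      exact fun hc => pvCrossConc _ _ (by decide) s hpre q hq0 hq1 hc
  · intro u _ m hm kv hmem
    have hm' : m < 3 := by simpa using hm
    simp only [List.mem_cons, List.not_mem_nil, or_false] at hmem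
    rcases hmem with rfl | rfl | rfl | rfl <;>
      (interval_cases m <;> exact pvNoPre _ _ (by decide) (by decide) _)

lemma pvStep4 : ∀ s : List Char,
    pvScan [("neurology".toList, "brain".toList),
      ("oncology".toList, "cancer".toList), ("gynaecology".toList, "gynecology".toList),
      ("paediatrics".toList, "pediatrics".toList)] s =
    pvScan [("oncology".toList, "cancer".toList), ("gynaecology".toList, "gynecology".toList),
      ("paediatrics".toList, "pediatrics".toList)]
      (pvRep "neurology".toList "brain".toList s) := by
  intro s
  apply pvGenStep _ _ _ (fun _ => True) (by decide) (by decide) (by decide)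
    (fun _ _ _ _ => trivial) ?_ ?_ (by decide) s trivial
  · intro s _ kv hmem hpre q hq0 hq1
    simp only [List.mem_cons, List.not_mem_nil, or_false] at hmem
    rcases hmem with rfl | rfl | rfl <;>
      exact fun hc => pvCrossConc _ _ (by decide) s hpre q hq0 hq1 hc
  · intro u _ m hm kv hmem
    have hm' : m < 5 := by simpa using hm
    simp only [List.mem_cons, List.not_mem_nil, or_false] at hmem
    rcases hmem with rfl | rfl | rfl <;>
      (interval_cases m <;> exact pvNoPre _ _ (by decide) (by decide) _)

lemma pvStep5 : ∀ s : List Char,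
    pvScan [("oncology".toList, "cancer".toList), ("gynaecology".toList, "gynecology".toList),
      ("paediatrics".toList, "pediatrics".toList)] s =
    pvScan [("gynaecology".toList, "gynecology".toList),
      ("paediatrics".toList, "pediatrics".toList)]
      (pvRep "oncology".toList "cancer".toList s) := by
  intro s
  apply pvGenStep _ _ _ (fun _ => True) (by decide) (by decide) (by decide)
    (fun _ _ _ _ => trivial) ?_ ?_ (by decide) s trivial
  · intro s _ kv hmem hpre q hq0 hq1
    simp only [List.mem_cons, List.not_mem_nil, or_false] at hmem
    rcases hmem with rfl | rfl <;>
      exact fun hc => pvCrossConc _ _ (by decide) s hpre q hq0 hq1 hc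
  · intro u _ m hm kv hmem
    have hm' : m < 6 := by simpa using hm
    simp only [List.mem_cons, List.not_mem_nil, or_false] at hmem
    rcases hmem with rfl | rfl <;>
      (interval_cases m <;> exact pvNoPre _ _ (by decide) (by decide) _)

lemma pvStep6 : ∀ s : List Char,
    pvScan [("gynaecology".toList, "gynecology".toList),
      ("paediatrics".toList, "pediatrics".toList)] s =
    pvScan [("paediatrics".toList, "pediatrics".toList)]
      (pvRep "gynaecology".toList "gynecology".toList s) := by
  intro s
  apply pvGenStep _ _ _ (fun _ => True) (by decide) (by decide) (by decide)
    (fun _ _ _ _ => trivial) ?_ ?_ (by decide) s trivial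
  · intro s _ kv hmem hpre q hq0 hq1
    simp only [List.mem_cons, List.not_mem_nil, or_false] at hmem
    rcases hmem with rfl <;>
      exact fun hc => pvCrossConc _ _ (by decide) s hpre q hq0 hq1 hc
  · intro u _ m hm kv hmem
    have hm' : m < 10 := by simpa using hm
    simp only [List.mem_cons, List.not_mem_nil, or_false] at hmem
    rcases hmem with rfl <;>
      (interval_cases m <;> exact pvNoPre _ _ (by decide) (by decide) _)

lemma pvStep7 : ∀ s : List Char,
    pvScan [("paediatrics".toList, "pediatrics".toList)] s =
    pvScan [] (pvRep "paediatrics".toList "pediatrics".toList s) := by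
  intro s
  apply pvGenStep _ _ _ (fun _ => True) (by decide) (by decide) (by decide)
    (fun _ _ _ _ => trivial) ?_ ?_ (by decide) s trivial
  · intro s _ kv hmem
    simp at hmem
  · intro u _ m hm kv hmem
    simp at hmem

-- the cardiac→heart pass cannot create an occurrence of "orthopedicurology"
lemma pvPres : ∀ u : List Char,
    "orthopedicurology".toList <:+: pvRep "cardiac".toList "heart".toList u →
    "orthopedicurology".toList <:+: u := by
  suffices H : ∀ n, ∀ u : List Char, u.length ≤ n →
      "orthopedicurology".toList <:+: pvRep "cardiac".toList "heart".toList u →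
      "orthopedicurology".toList <:+: u by
    intro u; exact H u.length u le_rfl
  intro n
  induction n with
  | zero =>
    intro u hl h
    have : u = [] := List.eq_nil_of_length_eq_zero (Nat.le_zero.mp hl)
    subst this
    rw [pvRep_nil] at h
    exact absurd (List.eq_nil_of_infix_nil h) (by decide)
  | succ n IH =>
    intro u hl h
    cases u with
    | nil =>
      rw [pvRep_nil] at h
      exact absurd (List.eq_nil_of_infix_nil h) (by decide)
    | cons c t =>
      by_cases hp : ("cardiac".toList).isPrefixOf (c :: t)
      · rcases List.isPrefixOf_iff_prefix.mp hp with ⟨u₂, hu₂⟩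
        rw [← hu₂, pvRep_match (by decide)] at h
        rcases h with ⟨pre, suf, hps⟩
        have hdp : ("heart".toList ++ pvRep "cardiac".toList "heart".toList u₂).drop pre.length =
            "orthopedicurology".toList ++ suf := by
          rw [← hps, List.append_assoc, List.drop_left]
        by_cases hi5 : 5 ≤ pre.length
        · have hx : "orthopedicurology".toList <:+: pvRep "cardiac".toList "heart".toList u₂ := by
            rw [pvDropAppend _ _ _ (by simpa using hi5)] at hdp
            have hpre2 : "orthopedicurology".toList <+:
                (pvRep "cardiac".toList "heart".toList u₂).drop (pre.length - ("heart".toList).length) :=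
              ⟨suf, hdp.symm⟩
            exact hpre2.isInfix.trans (List.drop_suffix _ _).isInfix
          have hlen : u₂.length ≤ n := by
            have h1 := congrArg List.length hu₂
            have h7 : ("cardiac".toList).length = 7 := by decide
            simp only [List.length_append, List.length_cons, h7] at h1
            have h2 : t.length + 1 ≤ n + 1 := by simpa using hl
            omega
          have := IH u₂ hlen hx
          refine this.trans ?_
          exact ⟨"cardiac".toList, [], by simpa using hu₂⟩
        · push_neg at hi5
          exfalso
          rw [List.drop_append_of_le_length (by simpa using le_of_lt hi5)] at hdp
          have hpre2 : "orthopedicurology".toList <+: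
              ("heart".toList).drop pre.length ++ pvRep "cardiac".toList "heart".toList u₂ :=
            ⟨suf, hdp.symm⟩
          rcases List.prefix_or_prefix_of_prefix hpre2 (List.prefix_append _ _) with h3 | h3
          · interval_cases h : pre.length <;> exact absurd h3 (by decide)
          · interval_cases h : pre.length <;> exact absurd h3 (by decide)
      · rw [pvRep_cons_neg hp] at h
        rcases List.infix_cons_iff.mp h with hpre | hinf
        · -- reflect the prefix through pvRep on t
          rw [show ("orthopedicurology".toList : List Char) =
                'o' :: "rthopedicurology".toList from by decide] at hpre ⊢
          rcases List.cons_prefix_cons.mp hpre with ⟨rfl, htail⟩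
          have ht : "rthopedicurology".toList <+: t := by
            rcases pvRep_decomp "cardiac".toList "heart".toList (by decide) t with heq | ⟨p, u', hmin, hdrop, heq⟩
            · rwa [heq] at htail
            · rw [heq] at htail
              have hpu : p ≤ t.length := by
                by_contra hgt
                push_neg at hgt
                rw [List.drop_eq_nil_of_le (le_of_lt hgt)] at hdrop
                exact (by decide : ("cardiac".toList : List Char) ≠ [])
                  (List.append_eq_nil_iff.mp hdrop.symm).1
              by_cases hle : ("rthopedicurology".toList).length ≤ p
              · have : "rthopedicurology".toList <+: t.take p :=
                  pvPrefixLe htail (by simpa [List.length_take, Nat.min_eq_left hpu] using hle)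
                exact this.trans (List.take_prefix p t)
              · push_neg at hle
                exfalso
                have hd2 := pvPrefixDrop p htail (le_of_lt hle)
                rw [List.drop_left' (by simp [List.length_take, Nat.min_eq_left hpu])] at hd2
                have h16 : p < 16 := by
                  have : ("rthopedicurology".toList).length = 16 := by decide
                  omega
                rcases List.prefix_or_prefix_of_prefix hd2 (List.prefix_append _ _) with h3 | h3
                · interval_cases p <;> exact absurd h3 (by decide)
                · interval_cases p <;> exact absurd h3 (by decide)
          rcases ht with ⟨r, hr⟩
          exact ⟨[], r, by simp [← hr]⟩
        · have ht := IH t (by simpa using Nat.lt_succ_iff.mp (by simpa using hl)) hinf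
          exact ht.trans ⟨[c], [], by simp⟩

lemma pvA_list (text : String) :
    (normalize_medical_terms text).toList =
      pvRep "paediatrics".toList "pediatrics".toList
        (pvRep "gynaecology".toList "gynecology".toList
          (pvRep "oncology".toList "cancer".toList
            (pvRep "neurology".toList "brain".toList
              (pvRep "ophthalmology".toList "eye".toList
                (pvRep "orthopedic".toList "bone".toList
                  (pvRep "cardiac".toList "heart".toList
                    ((PySem.Str.lower text).toList))))))) := by
  have hitems : (PySem.Dict.ofList
      [("cardiac", "heart"), ("orthopedic", "bone"), ("ophthalmology", "eye"),
       ("neurology", "brain"), ("oncology", "cancer"), ("gynaecology", "gynecology"),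
       ("paediatrics", "pediatrics")] : PySem.Dict String String).items =
      [("cardiac", "heart"), ("orthopedic", "bone"), ("ophthalmology", "eye"),
       ("neurology", "brain"), ("oncology", "cancer"), ("gynaecology", "gynecology"),
       ("paediatrics", "pediatrics")] := by decide
  rw [show normalize_medical_terms text =
        List.foldl (fun nt kv => PySem.Str.replace nt kv.1 kv.2) (PySem.Str.lower text)
          ((PySem.Dict.ofList
            [("cardiac", "heart"), ("orthopedic", "bone"), ("ophthalmology", "eye"),
             ("neurology", "brain"), ("oncology", "cancer"), ("gynaecology", "gynecology"),
             ("paediatrics", "pediatrics")] : PySem.Dict String String).items) from rfl]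
  rw [hitems]
  simp only [List.foldl_cons, List.foldl_nil]
  simp only [PySem.Str.toList_replace]
  rw [replace_eq_pvRep _ _ _ (by decide), replace_eq_pvRep _ _ _ (by decide),
      replace_eq_pvRep _ _ _ (by decide), replace_eq_pvRep _ _ _ (by decide),
      replace_eq_pvRep _ _ _ (by decide), replace_eq_pvRep _ _ _ (by decide),
      replace_eq_pvRep _ _ _ (by decide)]

lemma pvB_list (text : String) :
    (normalize_medical_terms_alt text).toList = pvScan pvMappings (PySem.Str.lower text).toList := by
  unfold normalize_medical_terms_alt
  exact String.toList_ofList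

lemma pvMain (text : String) (hND : ¬ D_normalize_medical_terms text) :
    normalize_medical_terms text = normalize_medical_terms_alt text := by
  apply String.toList_inj.mp
  rw [pvA_list, pvB_list]
  have hD : ¬ ("orthopedicardiac".toList <:+: (PySem.Str.lower text).toList) ∧
            ¬ ("orthopedicurology".toList <:+: (PySem.Str.lower text).toList) := by
    unfold D_normalize_medical_terms at hND
    rw [not_or] at hND
    refine ⟨fun hc => hND.1 ?_, fun hc => hND.2 ?_⟩
    · rw [PySem.Chars.isIn_iff_infix]
      rwa [PySem.Str.toList_lower] at hc
    · rw [PySem.Chars.isIn_iff_infix]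
      rwa [PySem.Str.toList_lower] at hc
  unfold pvMappings
  rw [pvStep1 _ ⟨hD.1, hD.2⟩,
      pvStep2 _ (fun hc => hD.2 (pvPres _ hc)),
      pvStep3, pvStep4, pvStep5, pvStep6, pvStep7, pvScan_nilKeys]

-- ========== tightness machinery ==========
lemma pvNoPreDrop (k b : List Char)
    (hb : ∀ q < b.length, ¬ k.isPrefixOf (b.drop q) ∧ ¬ (b.drop q).isPrefixOf k) (w : List Char) :
    ∀ q < b.length, ¬ k.isPrefixOf ((b ++ w).drop q) := by
  intro q hq
  rw [List.drop_append_of_le_length (le_of_lt hq)]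
  exact pvNoPre _ _ (hb q hq).1 (hb q hq).2 w

lemma pvRep_skip_front {old new : List Char} (hk : old ≠ []) (b w : List Char)
    (h : ∀ q < b.length, ¬ old.isPrefixOf ((b ++ w).drop q)) :
    pvRep old new (b ++ w) = b ++ pvRep old new (w) := by
  rw [pvRep_skip hk b.length (b ++ w) h, List.take_left, List.drop_left]

lemma pvRepSplit (k v z : List Char) (hk : k ≠ [])
    (H : ∀ m, 0 < m → m < k.length → ¬ (k.drop m).isPrefixOf z) :
    ∀ x, pvRep k v (x ++ z) = pvRep k v x ++ pvRep k v z := by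
  suffices Hs : ∀ n, ∀ x : List Char, x.length ≤ n →
      pvRep k v (x ++ z) = pvRep k v x ++ pvRep k v z by
    intro x; exact Hs x.length x le_rfl
  intro n
  induction n with
  | zero =>
    intro x hl
    have : x = [] := List.eq_nil_of_length_eq_zero (Nat.le_zero.mp hl)
    subst this; simp [pvRep_nil]
  | succ n IH =>
    intro x hl
    cases x with
    | nil => simp [pvRep_nil]
    | cons c t =>
      by_cases hp : k.isPrefixOf (c :: t)
      · have hlen : k.length ≤ t.length + 1 := by
          simpa using (List.isPrefixOf_iff_prefix.mp hp).length_le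
        have hp' : k.isPrefixOf ((c :: t) ++ z) := by
          rw [List.isPrefixOf_iff_prefix] at *
          exact hp.trans (List.prefix_append _ _)
        rw [List.cons_append, pvRep_cons_pos (by simpa using hp'), pvRep_cons_pos hp]
        rw [List.drop_append_of_le_length (by omega : k.length - 1 ≤ t.length)]
        rw [IH (t.drop (k.length - 1)) (by rw [List.length_drop]; simp at hl; omega)]
        simp
      · have hp' : ¬ k.isPrefixOf ((c :: t) ++ z) := by
          intro habs
          by_cases hle : k.length ≤ t.length + 1
          · exact hp (List.isPrefixOf_iff_prefix.mpr
              (pvPrefixLe (by simpa using List.isPrefixOf_iff_prefix.mp habs) (by simpa using hle)))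
          · push_neg at hle
            have hdrop := pvPrefixDrop (t.length + 1) (List.isPrefixOf_iff_prefix.mp habs)
              (by omega)
            rw [show ((c :: t) ++ z).drop (t.length + 1) = z from by
              rw [show t.length + 1 = (c :: t).length from by simp, List.drop_left]] at hdrop
            exact H (t.length + 1) (by omega) (by omega)
              (List.isPrefixOf_iff_prefix.mpr hdrop)
        rw [List.cons_append, pvRep_cons_neg (by simpa using hp'), pvRep_cons_neg hp]
        rw [IH t (by simp at hl; omega)]
        simp

lemma pvScanSplit (ps : List (List Char × List Char)) (z : List Char)
    (hps : ∀ kv ∈ ps, kv.1 ≠ ([] : List Char))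
    (H : ∀ kv ∈ ps, ∀ m, 0 < m → m < kv.1.length → ¬ (kv.1.drop m).isPrefixOf z) :
    ∀ x, pvScan ps (x ++ z) = pvScan ps x ++ pvScan ps z := by
  suffices Hs : ∀ n, ∀ x : List Char, x.length ≤ n →
      pvScan ps (x ++ z) = pvScan ps x ++ pvScan ps z by
    intro x; exact Hs x.length x le_rfl
  intro n
  induction n with
  | zero =>
    intro x hl
    have : x = [] := List.eq_nil_of_length_eq_zero (Nat.le_zero.mp hl)
    subst this; simp [pvScan_nil]
  | succ n IH =>
    intro x hl
    cases x with
    | nil => simp [pvScan_nil]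
    | cons c t =>
      have hpred : ∀ kv ∈ ps, kv.1.isPrefixOf (c :: (t ++ z)) = kv.1.isPrefixOf (c :: t) := by
        intro kv hmem
        apply Bool.eq_iff_iff.mpr
        simp only [List.isPrefixOf_iff_prefix]
        constructor
        · intro h
          by_cases hle : kv.1.length ≤ t.length + 1
          · exact pvPrefixLe (by simpa using h) (by simpa using hle)
          · push_neg at hle
            exfalso
            have hdrop := pvPrefixDrop (t.length + 1) (by simpa using h : kv.1 <+: (c :: t) ++ z)
              (by omega)
            rw [show ((c :: t) ++ z).drop (t.length + 1) = z from by
              rw [show t.length + 1 = (c :: t).length from by simp, List.drop_left]] at hdrop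
            exact H kv hmem (t.length + 1) (by omega) (by omega)
              (List.isPrefixOf_iff_prefix.mpr hdrop)
        · intro h
          exact h.trans (by simpa using List.prefix_append (c :: t) z)
      rw [List.cons_append]
      rcases hfind : ps.find? (fun kv => kv.1.isPrefixOf (c :: t)) with _ | ⟨k₀, v₀⟩
      · have h1 : ps.find? (fun kv => kv.1.isPrefixOf (c :: (t ++ z))) = none := by
          rw [pvFind?_congr ps _ _ hpred, hfind]
        rw [pvScan_cons_none h1, pvScan_cons_none hfind]
        rw [IH t (by simp at hl; omega)]
        simp
      · have h1 : ps.find? (fun kv => kv.1.isPrefixOf (c :: (t ++ z))) = some (k₀, v₀) := by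
          rw [pvFind?_congr ps _ _ hpred, hfind]
        rw [pvScan_cons_some h1, pvScan_cons_some hfind]
        have hkpre : k₀.isPrefixOf (c :: t) := by
          have := List.find?_some hfind
          simpa using this
        have hlen : k₀.length - 1 ≤ t.length := by
          have := (List.isPrefixOf_iff_prefix.mp hkpre).length_le
          simp at this
          omega
        rw [List.drop_append_of_le_length hlen]
        rw [IH (t.drop (k₀.length - 1)) (by rw [List.length_drop]; simp at hl; omega)]
        simp

def pvRepChain (s : List Char) : List Char :=
  pvRep "paediatrics".toList "pediatrics".toList
    (pvRep "gynaecology".toList "gynecology".toList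
      (pvRep "oncology".toList "cancer".toList
        (pvRep "neurology".toList "brain".toList
          (pvRep "ophthalmology".toList "eye".toList
            (pvRep "orthopedic".toList "bone".toList
              (pvRep "cardiac".toList "heart".toList s))))))

lemma pvTight1 (y : List Char) :
    pvRepChain ("orthopedicardiac".toList ++ y) ≠
      pvScan pvMappings ("orthopedicardiac".toList ++ y) := by
  have hsplit : ("orthopedicardiac".toList : List Char) ++ y =
      "orthopedi".toList ++ ("cardiac".toList ++ y) := by
    rw [show ("orthopedicardiac".toList : List Char) =
      "orthopedi".toList ++ "cardiac".toList from by decide, List.append_assoc]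
  have E : pvRepChain ("orthopedicardiac".toList ++ y) =
      "orthopediheart".toList ++
        (pvRep "paediatrics".toList "pediatrics".toList
          (pvRep "gynaecology".toList "gynecology".toList
            (pvRep "oncology".toList "cancer".toList
              (pvRep "neurology".toList "brain".toList
                (pvRep "ophthalmology".toList "eye".toList
                  (pvRep "orthopedic".toList "bone".toList
                    (pvRep "cardiac".toList "heart".toList y))))))) := by
    unfold pvRepChain
    rw [hsplit, pvRep_skip_front (by decide) "orthopedi".toList _ (pvNoPreDrop _ _ (by decide) _),
        pvRep_match (by decide)]
    rw [← List.append_assoc,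
        show ("orthopedi".toList : List Char) ++ "heart".toList = "orthopediheart".toList from by decide]
    rw [pvRep_skip_front (by decide) "orthopediheart".toList _ (pvNoPreDrop _ _ (by decide) _)]
    rw [pvRep_skip_front (by decide) "orthopediheart".toList _ (pvNoPreDrop _ _ (by decide) _)]
    rw [pvRep_skip_front (by decide) "orthopediheart".toList _ (pvNoPreDrop _ _ (by decide) _)]
    rw [pvRep_skip_front (by decide) "orthopediheart".toList _ (pvNoPreDrop _ _ (by decide) _)]
    rw [pvRep_skip_front (by decide) "orthopediheart".toList _ (pvNoPreDrop _ _ (by decide) _)]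
    rw [pvRep_skip_front (by decide) "orthopediheart".toList _ (pvNoPreDrop _ _ (by decide) _)]
  have hz : ("orthopedicardiac".toList : List Char) ++ y =
      'o' :: ("rthopedicardiac".toList ++ y) := by
    rw [show ("orthopedicardiac".toList : List Char) =
      'o' :: "rthopedicardiac".toList from by decide, List.cons_append]
  have hncard : ¬ ("cardiac".toList).isPrefixOf ("orthopedicardiac".toList ++ y) :=
    pvNoPre _ _ (by decide) (by decide) y
  have hortho : ("orthopedic".toList).isPrefixOf ("orthopedicardiac".toList ++ y) := by
    rw [List.isPrefixOf_iff_prefix,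
        show ("orthopedicardiac".toList : List Char) ++ y =
          "orthopedic".toList ++ ("ardiac".toList ++ y) from by
            rw [show ("orthopedicardiac".toList : List Char) =
              "orthopedic".toList ++ "ardiac".toList from by decide, List.append_assoc]]
    exact List.prefix_append _ _
  have hfind : pvMappings.find?
      (fun kv => kv.1.isPrefixOf ('o' :: ("rthopedicardiac".toList ++ y))) =
      some ("orthopedic".toList, "bone".toList) := by
    rw [← hz]
    unfold pvMappings
    rw [List.find?_cons_of_neg (by simpa using hncard),
        List.find?_cons_of_pos (by simpa using hortho)]
  have S : pvScan pvMappings ("orthopedicardiac".toList ++ y) =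
      "bone".toList ++ pvScan pvMappings
        (("rthopedicardiac".toList ++ y).drop (("orthopedic".toList).length - 1)) := by
    rw [hz]
    exact pvScan_cons_some hfind
  intro heq
  have h2 := congrArg (List.take 2) heq
  rw [E, S, List.take_append_of_le_length (by decide),
      List.take_append_of_le_length (by decide)] at h2
  exact absurd h2 (by decide)

lemma pvTight2 (y : List Char) :
    pvRepChain ("orthopedicurology".toList ++ y) ≠
      pvScan pvMappings ("orthopedicurology".toList ++ y) := by
  have E : pvRepChain ("orthopedicurology".toList ++ y) =
      "bobrain".toList ++
        (pvRep "paediatrics".toList "pediatrics".toList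
          (pvRep "gynaecology".toList "gynecology".toList
            (pvRep "oncology".toList "cancer".toList
              (pvRep "neurology".toList "brain".toList
                (pvRep "ophthalmology".toList "eye".toList
                  (pvRep "orthopedic".toList "bone".toList
                    (pvRep "cardiac".toList "heart".toList y))))))) := by
    unfold pvRepChain
    -- pass 1: cardiac does not occur in "orthopedicurology"
    rw [pvRep_skip_front (by decide) "orthopedicurology".toList _ (pvNoPreDrop _ _ (by decide) _)]
    -- pass 2: orthopedic matches at the front, then skips over "urology"
    rw [show ("orthopedicurology".toList : List Char) ++ pvRep "cardiac".toList "heart".toList y =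
          "orthopedic".toList ++ ("urology".toList ++ pvRep "cardiac".toList "heart".toList y) from by
        rw [show ("orthopedicurology".toList : List Char) =
          "orthopedic".toList ++ "urology".toList from by decide, List.append_assoc]]
    rw [pvRep_match (by decide)]
    rw [pvRep_skip_front (by decide) "urology".toList _ (pvNoPreDrop _ _ (by decide) _)]
    rw [← List.append_assoc,
        show ("bone".toList : List Char) ++ "urology".toList = "boneurology".toList from by decide]
    -- pass 3: ophthalmology touches nothing in "boneurology"
    rw [pvRep_skip_front (by decide) "boneurology".toList _ (pvNoPreDrop _ _ (by decide) _)]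
    -- pass 4: the fabricated "neurology" at offset 2 is replaced by "brain"
    rw [show ("boneurology".toList : List Char) ++
          (pvRep "ophthalmology".toList "eye".toList
            (pvRep "orthopedic".toList "bone".toList
              (pvRep "cardiac".toList "heart".toList y))) =
        "bo".toList ++ ("neurology".toList ++
          (pvRep "ophthalmology".toList "eye".toList
            (pvRep "orthopedic".toList "bone".toList
              (pvRep "cardiac".toList "heart".toList y)))) from by
        rw [show ("boneurology".toList : List Char) =
          "bo".toList ++ "neurology".toList from by decide, List.append_assoc]]
    rw [pvRep_skip_front (by decide) "bo".toList _ (pvNoPreDrop _ _ (by decide) _)]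
    rw [pvRep_match (by decide)]
    rw [← List.append_assoc,
        show ("bo".toList : List Char) ++ "brain".toList = "bobrain".toList from by decide]
    -- passes 5–7: nothing in "bobrain" is touched
    rw [pvRep_skip_front (by decide) "bobrain".toList _ (pvNoPreDrop _ _ (by decide) _)]
    rw [pvRep_skip_front (by decide) "bobrain".toList _ (pvNoPreDrop _ _ (by decide) _)]
    rw [pvRep_skip_front (by decide) "bobrain".toList _ (pvNoPreDrop _ _ (by decide) _)]
  have hz : ("orthopedicurology".toList : List Char) ++ y =
      'o' :: ("rthopedicurology".toList ++ y) := by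
    rw [show ("orthopedicurology".toList : List Char) =
      'o' :: "rthopedicurology".toList from by decide, List.cons_append]
  have hncard : ¬ ("cardiac".toList).isPrefixOf ("orthopedicurology".toList ++ y) :=
    pvNoPre _ _ (by decide) (by decide) y
  have hortho : ("orthopedic".toList).isPrefixOf ("orthopedicurology".toList ++ y) := by
    rw [List.isPrefixOf_iff_prefix,
        show ("orthopedicurology".toList : List Char) ++ y =
          "orthopedic".toList ++ ("urology".toList ++ y) from by
            rw [show ("orthopedicurology".toList : List Char) =
              "orthopedic".toList ++ "urology".toList from by decide, List.append_assoc]]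
    exact List.prefix_append _ _
  have hfind : pvMappings.find?
      (fun kv => kv.1.isPrefixOf ('o' :: ("rthopedicurology".toList ++ y))) =
      some ("orthopedic".toList, "bone".toList) := by
    rw [← hz]
    unfold pvMappings
    rw [List.find?_cons_of_neg (by simpa using hncard),
        List.find?_cons_of_pos (by simpa using hortho)]
  have S : pvScan pvMappings ("orthopedicurology".toList ++ y) =
      "bone".toList ++ pvScan pvMappings
        (("rthopedicurology".toList ++ y).drop (("orthopedic".toList).length - 1)) := by
    rw [hz]
    exact pvScan_cons_some hfind
  intro heq
  have h3 := congrArg (List.take 3) heq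
  rw [E, S, List.take_append_of_le_length (by decide),
      List.take_append_of_le_length (by decide)] at h3
  exact absurd h3 (by decide)

lemma pvChainSplit1 (x y : List Char) :
    pvRepChain (x ++ ("orthopedicardiac".toList ++ y)) =
      pvRepChain x ++ pvRepChain ("orthopedicardiac".toList ++ y) := by
  unfold pvRepChain
  rw [pvRepSplit "cardiac".toList "heart".toList _ (by decide)
      (by intro m h0 hm; replace hm : m < 7 := by { have := (by decide : ("cardiac".toList).length = 7); omega }; interval_cases m <;> exact pvNoPre _ _ (by decide) (by decide) _) x]
  rw [show ("orthopedicardiac".toList : List Char) ++ y =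
      "orthopedi".toList ++ ("cardiac".toList ++ y) from by
    rw [show ("orthopedicardiac".toList : List Char) =
      "orthopedi".toList ++ "cardiac".toList from by decide, List.append_assoc]]
  rw [pvRep_skip_front (by decide) "orthopedi".toList _ (pvNoPreDrop _ _ (by decide) _),
      pvRep_match (by decide),
      ← List.append_assoc "orthopedi".toList "heart".toList,
      show ("orthopedi".toList : List Char) ++ "heart".toList = "orthopediheart".toList from by decide]
  rw [pvRepSplit "orthopedic".toList "bone".toList _ (by decide)
      (by intro m h0 hm; replace hm : m < 10 := by { have := (by decide : ("orthopedic".toList).length = 10); omega }; interval_cases m <;> exact pvNoPre _ _ (by decide) (by decide) _)]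
  rw [pvRep_skip_front (by decide) "orthopediheart".toList _ (pvNoPreDrop _ _ (by decide) _)]
  rw [pvRepSplit "ophthalmology".toList "eye".toList _ (by decide)
      (by intro m h0 hm; replace hm : m < 13 := by { have := (by decide : ("ophthalmology".toList).length = 13); omega }; interval_cases m <;> exact pvNoPre _ _ (by decide) (by decide) _)]
  rw [pvRep_skip_front (by decide) "orthopediheart".toList _ (pvNoPreDrop _ _ (by decide) _)]
  rw [pvRepSplit "neurology".toList "brain".toList _ (by decide)
      (by intro m h0 hm; replace hm : m < 9 := by { have := (by decide : ("neurology".toList).length = 9); omega }; interval_cases m <;> exact pvNoPre _ _ (by decide) (by decide) _)]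
  rw [pvRep_skip_front (by decide) "orthopediheart".toList _ (pvNoPreDrop _ _ (by decide) _)]
  rw [pvRepSplit "oncology".toList "cancer".toList _ (by decide)
      (by intro m h0 hm; replace hm : m < 8 := by { have := (by decide : ("oncology".toList).length = 8); omega }; interval_cases m <;> exact pvNoPre _ _ (by decide) (by decide) _)]
  rw [pvRep_skip_front (by decide) "orthopediheart".toList _ (pvNoPreDrop _ _ (by decide) _)]
  rw [pvRepSplit "gynaecology".toList "gynecology".toList _ (by decide)
      (by intro m h0 hm; replace hm : m < 11 := by { have := (by decide : ("gynaecology".toList).length = 11); omega }; interval_cases m <;> exact pvNoPre _ _ (by decide) (by decide) _)]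
  rw [pvRep_skip_front (by decide) "orthopediheart".toList _ (pvNoPreDrop _ _ (by decide) _)]
  rw [pvRepSplit "paediatrics".toList "pediatrics".toList _ (by decide)
      (by intro m h0 hm; replace hm : m < 11 := by { have := (by decide : ("paediatrics".toList).length = 11); omega }; interval_cases m <;> exact pvNoPre _ _ (by decide) (by decide) _)]

lemma pvChainSplit2 (x y : List Char) :
    pvRepChain (x ++ ("orthopedicurology".toList ++ y)) =
      pvRepChain x ++ pvRepChain ("orthopedicurology".toList ++ y) := by
  unfold pvRepChain
  rw [pvRepSplit "cardiac".toList "heart".toList _ (by decide)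
      (by intro m h0 hm
          replace hm : m < 7 := by have := (by decide : ("cardiac".toList).length = 7); omega
          interval_cases m <;> exact pvNoPre _ _ (by decide) (by decide) _) x]
  rw [pvRep_skip_front (by decide) "orthopedicurology".toList _ (pvNoPreDrop _ _ (by decide) _)]
  generalize pvRep "cardiac".toList "heart".toList y = Y1
  rw [pvRepSplit "orthopedic".toList "bone".toList _ (by decide)
      (by intro m h0 hm
          replace hm : m < 10 := by have := (by decide : ("orthopedic".toList).length = 10); omega
          interval_cases m <;> exact pvNoPre _ _ (by decide) (by decide) _)]
  rw [show ("orthopedicurology".toList : List Char) ++ Y1 =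
      "orthopedic".toList ++ ("urology".toList ++ Y1) from by
    rw [show ("orthopedicurology".toList : List Char) =
      "orthopedic".toList ++ "urology".toList from by decide, List.append_assoc]]
  rw [pvRep_match (by decide),
      pvRep_skip_front (by decide) "urology".toList _ (pvNoPreDrop _ _ (by decide) _),
      ← List.append_assoc "bone".toList "urology".toList,
      show ("bone".toList : List Char) ++ "urology".toList = "boneurology".toList from by decide]
  generalize pvRep "orthopedic".toList "bone".toList Y1 = Y2
  rw [pvRepSplit "ophthalmology".toList "eye".toList _ (by decide)
      (by intro m h0 hm
          replace hm : m < 13 := by have := (by decide : ("ophthalmology".toList).length = 13); omega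
          interval_cases m <;> exact pvNoPre _ _ (by decide) (by decide) _)]
  rw [pvRep_skip_front (by decide) "boneurology".toList _ (pvNoPreDrop _ _ (by decide) _)]
  generalize pvRep "ophthalmology".toList "eye".toList Y2 = Y3
  rw [pvRepSplit "neurology".toList "brain".toList _ (by decide)
      (by intro m h0 hm
          replace hm : m < 9 := by have := (by decide : ("neurology".toList).length = 9); omega
          interval_cases m <;> exact pvNoPre _ _ (by decide) (by decide) _)]
  rw [show ("boneurology".toList : List Char) ++ Y3 =
      "bo".toList ++ ("neurology".toList ++ Y3) from by
    rw [show ("boneurology".toList : List Char) =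
      "bo".toList ++ "neurology".toList from by decide, List.append_assoc]]
  rw [pvRep_skip_front (by decide) "bo".toList _ (pvNoPreDrop _ _ (by decide) _),
      pvRep_match (by decide),
      ← List.append_assoc "bo".toList "brain".toList,
      show ("bo".toList : List Char) ++ "brain".toList = "bobrain".toList from by decide]
  generalize pvRep "neurology".toList "brain".toList Y3 = Y4
  rw [pvRepSplit "oncology".toList "cancer".toList _ (by decide)
      (by intro m h0 hm
          replace hm : m < 8 := by have := (by decide : ("oncology".toList).length = 8); omega
          interval_cases m <;> exact pvNoPre _ _ (by decide) (by decide) _)]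
  rw [pvRep_skip_front (by decide) "bobrain".toList _ (pvNoPreDrop _ _ (by decide) _)]
  generalize pvRep "oncology".toList "cancer".toList Y4 = Y5
  rw [pvRepSplit "gynaecology".toList "gynecology".toList _ (by decide)
      (by intro m h0 hm
          replace hm : m < 11 := by have := (by decide : ("gynaecology".toList).length = 11); omega
          interval_cases m <;> exact pvNoPre _ _ (by decide) (by decide) _)]
  rw [pvRep_skip_front (by decide) "bobrain".toList _ (pvNoPreDrop _ _ (by decide) _)]
  generalize pvRep "gynaecology".toList "gynecology".toList Y5 = Y6
  rw [pvRepSplit "paediatrics".toList "pediatrics".toList _ (by decide)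
      (by intro m h0 hm
          replace hm : m < 11 := by have := (by decide : ("paediatrics".toList).length = 11); omega
          interval_cases m <;> exact pvNoPre _ _ (by decide) (by decide) _)]

lemma pvMainList (s : List Char)
    (h1 : ¬ "orthopedicardiac".toList <:+: s)
    (h2 : ¬ "orthopedicurology".toList <:+: s) :
    pvScan pvMappings s = pvRepChain s := by
  unfold pvRepChain pvMappings
  rw [pvStep1 _ ⟨h1, h2⟩, pvStep2 _ (fun hc => h2 (pvPres _ hc)),
      pvStep3, pvStep4, pvStep5, pvStep6, pvStep7, pvScan_nilKeys]

lemma pvOrthoCross (k : List Char)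
    (hk : ∀ m < k.length, 0 < m →
      ¬ (k.drop m).isPrefixOf "orthopedic".toList ∧
      ¬ ("orthopedic".toList).isPrefixOf (k.drop m)) :
    ∀ m, 0 < m → m < k.length → ∀ w, ¬ (k.drop m).isPrefixOf ("orthopedic".toList ++ w) :=
  fun m h0 hm w => pvNoPre _ _ (hk m hm h0).1 (hk m hm h0).2 w

lemma pvScanSplitOrtho (w : List Char) :
    ∀ x, pvScan pvMappings (x ++ ("orthopedic".toList ++ w)) =
      pvScan pvMappings x ++ pvScan pvMappings ("orthopedic".toList ++ w) := by
  apply pvScanSplit _ _ (by decide)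
  intro kv hmem m h0 hm
  unfold pvMappings at hmem
  simp only [List.mem_cons, List.not_mem_nil, or_false] at hmem
  rcases hmem with rfl | rfl | rfl | rfl | rfl | rfl | rfl <;>
    exact pvOrthoCross _ (by decide) m h0 hm w

lemma pvNoBadInX (s0 : List Char) (P : Nat → Bool) (p : Nat)
    (hmin : ∀ j, j < p → ¬ P j = true) (bw : List Char) (hbw : bw ≠ [])
    (himp : ∀ j, bw.isPrefixOf (s0.drop j) → P j = true) :
    ¬ bw <:+: s0.take p := by
  rintro ⟨pre, suf, hps⟩
  have hdp : bw <+: (s0.take p).drop pre.length :=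
    ⟨suf, by rw [← hps, List.append_assoc, List.drop_left]⟩
  by_cases hlt : pre.length < p
  · have hle : (s0.take p).drop pre.length <+: s0.drop pre.length := by
      rw [List.drop_take]
      exact List.take_prefix _ _
    exact hmin _ hlt (himp _ (List.isPrefixOf_iff_prefix.mpr (hdp.trans hle)))
  · push_neg at hlt
    have hnil : (s0.take p).drop pre.length = [] :=
      List.drop_eq_nil_of_le (by rw [List.length_take]; omega)
    rw [hnil] at hdp
    exact hbw (List.prefix_nil.mp hdp)

lemma pvTightMain (text : String) (hD : D_normalize_medical_terms text) :
    normalize_medical_terms text ≠ normalize_medical_terms_alt text := by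
  intro heq
  have hlist0 := congrArg String.toList heq
  rw [pvA_list, pvB_list] at hlist0
  have hlist : pvRepChain ((PySem.Str.lower text).toList) =
      pvScan pvMappings ((PySem.Str.lower text).toList) := hlist0
  set s0 := (PySem.Str.lower text).toList with hs0def
  have hex : ∃ q, (("orthopedicardiac".toList).isPrefixOf (s0.drop q) ||
      ("orthopedicurology".toList).isPrefixOf (s0.drop q)) = true := by
    unfold D_normalize_medical_terms at hD
    rcases hD with h | h
    · have hinf := (PySem.Chars.isIn_iff_infix _ _).mp h
      rw [← PySem.Str.toList_lower] at hinf
      rcases hinf with ⟨pre, suf, hps⟩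
      refine ⟨pre.length, ?_⟩
      have hp : "orthopedicardiac".toList <+: s0.drop pre.length := by
        rw [hs0def, ← hps, List.append_assoc, List.drop_left]
        exact List.prefix_append _ _
      rw [Bool.or_eq_true_iff]
      exact Or.inl (List.isPrefixOf_iff_prefix.mpr hp)
    · have hinf := (PySem.Chars.isIn_iff_infix _ _).mp h
      rw [← PySem.Str.toList_lower] at hinf
      rcases hinf with ⟨pre, suf, hps⟩
      refine ⟨pre.length, ?_⟩
      have hp : "orthopedicurology".toList <+: s0.drop pre.length := by
        rw [hs0def, ← hps, List.append_assoc, List.drop_left]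
        exact List.prefix_append _ _
      rw [Bool.or_eq_true_iff]
      exact Or.inr (List.isPrefixOf_iff_prefix.mpr hp)
  have hQ := Nat.find_spec hex
  have hmin : ∀ j, j < Nat.find hex →
      ¬ (("orthopedicardiac".toList).isPrefixOf (s0.drop j) ||
         ("orthopedicurology".toList).isPrefixOf (s0.drop j)) = true :=
    fun j hj => Nat.find_min hex hj
  set p := Nat.find hex with hpdef
  have hxz : s0.take p ++ s0.drop p = s0 := List.take_append_drop p s0
  have hnb1 : ¬ "orthopedicardiac".toList <:+: s0.take p :=
    pvNoBadInX s0 _ p hmin _ (by decide)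
      (fun j hj => Bool.or_eq_true_iff.mpr (Or.inl hj))
  have hnb2 : ¬ "orthopedicurology".toList <:+: s0.take p :=
    pvNoBadInX s0 _ p hmin _ (by decide)
      (fun j hj => Bool.or_eq_true_iff.mpr (Or.inr hj))
  have hx : pvScan pvMappings (s0.take p) = pvRepChain (s0.take p) :=
    pvMainList _ hnb1 hnb2
  rcases Bool.or_eq_true_iff.mp hQ with hb | hb
  · obtain ⟨y, hy⟩ := List.isPrefixOf_iff_prefix.mp hb
    have hrepl : s0 = s0.take p ++ ("orthopedicardiac".toList ++ y) := by rw [hy, hxz]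
    have hB : pvScan pvMappings (s0.take p ++ ("orthopedicardiac".toList ++ y)) =
        pvScan pvMappings (s0.take p) ++ pvScan pvMappings ("orthopedicardiac".toList ++ y) := by
      rw [show ("orthopedicardiac".toList : List Char) ++ y =
          "orthopedic".toList ++ ("ardiac".toList ++ y) from by
        rw [show ("orthopedicardiac".toList : List Char) =
          "orthopedic".toList ++ "ardiac".toList from by decide, List.append_assoc]]
      exact pvScanSplitOrtho _ _
    have hthis := hlist
    rw [hrepl, pvChainSplit1, hB, hx] at hthis
    exact pvTight1 y (List.append_cancel_left hthis)
  · obtain ⟨y, hy⟩ := List.isPrefixOf_iff_prefix.mp hb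
    have hrepl : s0 = s0.take p ++ ("orthopedicurology".toList ++ y) := by rw [hy, hxz]
    have hB : pvScan pvMappings (s0.take p ++ ("orthopedicurology".toList ++ y)) =
        pvScan pvMappings (s0.take p) ++ pvScan pvMappings ("orthopedicurology".toList ++ y) := by
      rw [show ("orthopedicurology".toList : List Char) ++ y =
          "orthopedic".toList ++ ("urology".toList ++ y) from by
        rw [show ("orthopedicurology".toList : List Char) =
          "orthopedic".toList ++ "urology".toList from by decide, List.append_assoc]]
      exact pvScanSplitOrtho _ _
    have hthis := hlist
    rw [hrepl, pvChainSplit2, hB, hx] at hthis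
    exact pvTight2 y (List.append_cancel_left hthis)

-- ===== VERDICT (by name: the statement is the Claim_ definition above) =====
theorem normalize_medical_terms_spec : Claim_unchanged_normalize_medical_terms := by
  intro text _ hND
  exact pvMain text hND

theorem normalize_medical_terms_changed : Claim_changed_normalize_medical_terms := by
  unfold Claim_changed_normalize_medical_terms
  decide

theorem normalize_medical_terms_tight : Claim_exact_normalize_medical_terms := by
  intro text _ hD
  exact pvTightMain text hD
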